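-- pv_equiv track=rewrite | github.com/pypi-data/pypi-mirror-90 | packages/adnar-scraper/adnar-scraper-0.1.92.tar.gz/adnar-scraper-0.1.92/adnar_scraper/utility/shop_analyzer.py | get_shop_included_with_mall_data
-- ===== SOURCE A (Python) =====
-- def get_shop_included_with_mall_data(shop_graph_data_set, show_item_data_set, mall_info_data_set):
--     not_included_shops = dict()
--
--     for shop_name in shop_graph_data_set.keys():
--         if shop_name not in show_item_data_set:
--             not_included_shops[shop_name] = True
--
--     filtered_mall_info_list = []
--
--     for mall_info in mall_info_data_set:
--         if mall_info["name"] in not_included_shops: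
--             filtered_mall_info_list.append(mall_info)
--
--     return filtered_mall_info_list
-- ===== SOURCE B (Python) =====
-- def get_shop_included_with_mall_data(shop_graph_data_set, show_item_data_set, mall_info_data_set):
--     # Structural recursion on mall_info_data_set: no intermediate not_included_shops dict is
--     # ever built; each record's name is tested directly and kept records are cons'd onto the
--     # recursively filtered tail.
--     if not mall_info_data_set:
--         return []
--     head = mall_info_data_set[0]
--     tail = get_shop_included_with_mall_data(shop_graph_data_set, show_item_data_set,
--                                             mall_info_data_set[1:])
--     name = head["name"]
--     if name in shop_graph_data_set and name not in show_item_data_set: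
--         return [head] + tail
--     return tail
-- ===== Notes on version B (the rewrite author's own statement) =====
-- stated objective: alternative
-- what changed: Replaces A's two staged loops (first materialise a not_included_shops dict from shop_graph keys, then filter by appending to an accumulator) with a direct structural recursion on mall_info_data_set that builds no intermediate dict at all, tests each record's name straight against the two input dicts, and conses kept records onto the recursively filtered tail.
import Mathlib
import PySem

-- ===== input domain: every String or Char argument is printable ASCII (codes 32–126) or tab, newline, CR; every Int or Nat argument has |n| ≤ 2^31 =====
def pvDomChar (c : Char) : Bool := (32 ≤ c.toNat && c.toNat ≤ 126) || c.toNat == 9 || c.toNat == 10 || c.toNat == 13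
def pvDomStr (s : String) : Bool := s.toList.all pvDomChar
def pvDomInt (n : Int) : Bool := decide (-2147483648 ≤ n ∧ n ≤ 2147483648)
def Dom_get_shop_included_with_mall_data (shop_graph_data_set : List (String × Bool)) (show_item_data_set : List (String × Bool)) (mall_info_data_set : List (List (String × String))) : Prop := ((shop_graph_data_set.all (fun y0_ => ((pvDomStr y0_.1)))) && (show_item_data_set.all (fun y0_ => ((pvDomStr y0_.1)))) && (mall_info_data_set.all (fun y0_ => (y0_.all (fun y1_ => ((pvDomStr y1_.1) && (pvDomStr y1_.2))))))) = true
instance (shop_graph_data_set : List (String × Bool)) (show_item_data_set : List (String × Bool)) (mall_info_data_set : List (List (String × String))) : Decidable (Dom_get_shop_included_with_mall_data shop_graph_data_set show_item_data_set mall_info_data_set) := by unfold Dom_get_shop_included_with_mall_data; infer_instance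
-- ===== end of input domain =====

-- B replaces A's two staged loops (build a not_included_shops dict, then filter by appending)
-- with a structural recursion on mall_info_data_set that builds no intermediate dict and conses
-- kept records onto the recursively filtered tail (alternative decomposition, same return value).

-- ===== PORT A =====
def get_shop_included_with_mall_data (shop_graph_data_set : List (String × Bool)) (show_item_data_set : List (String × Bool)) (mall_info_data_set : List (List (String × String))) : List (List (String × String)) :=
  let shop_graph : PySem.Dict String Bool := PySem.Dict.ofList shop_graph_data_set
  let show_item : PySem.Dict String Bool := PySem.Dict.ofList show_item_data_set
  -- for shop_name in shop_graph_data_set.keys(): if shop_name not in show_item_data_set: not_included_shops[shop_name] = True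
  let not_included_shops : PySem.Dict String Bool :=
    shop_graph.keys.foldl
      (fun d shop_name => if show_item.contains shop_name then d else d.insert shop_name true)
      PySem.Dict.empty
  -- for mall_info in mall_info_data_set: if mall_info["name"] in not_included_shops: append
  mall_info_data_set.foldl
    (fun acc mall_info =>
      match (PySem.Dict.ofList mall_info).get? "name" with   -- mall_info["name"]; none = KeyError, excluded by Pre_
      | some n => if not_included_shops.contains n then acc ++ [mall_info] else acc
      | none => acc)
    []

-- ===== PORT B =====
def get_shop_included_with_mall_data_alt (shop_graph_data_set : List (String × Bool)) (show_item_data_set : List (String × Bool)) (mall_info_data_set : List (List (String × String))) : List (List (String × String)) :=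
  match mall_info_data_set with
  | [] => []
  | head :: rest =>
    let tail := get_shop_included_with_mall_data_alt shop_graph_data_set show_item_data_set rest
    match (PySem.Dict.ofList head).get? "name" with         -- head["name"]; none = KeyError, excluded by Pre_
    | some name =>
        if (PySem.Dict.ofList shop_graph_data_set).contains name
            && !((PySem.Dict.ofList show_item_data_set).contains name)
        then head :: tail else tail
    | none => tail

-- ===== PRECONDITION & SPEC =====
-- Pre_ excludes exactly the inputs where some mall_info lacks the key "name": there the Python A
-- (and B alike) raises KeyError.
def Pre_get_shop_included_with_mall_data (shop_graph_data_set : List (String × Bool)) (show_item_data_set : List (String × Bool)) (mall_info_data_set : List (List (String × String))) : Prop :=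
  ∀ m ∈ mall_info_data_set, "name" ∈ m.map Prod.fst
instance (shop_graph_data_set : List (String × Bool)) (show_item_data_set : List (String × Bool)) (mall_info_data_set : List (List (String × String))) : Decidable (Pre_get_shop_included_with_mall_data shop_graph_data_set show_item_data_set mall_info_data_set) := by unfold Pre_get_shop_included_with_mall_data; infer_instance

def pvWitness_get_shop_included_with_mall_data : (List (String × Bool)) × (List (String × Bool)) × (List (List (String × String))) :=
  ([("shopA", true), ("shopB", true)], [("shopB", true)], [[("name", "shopA"), ("url", "u")], [("name", "shopC")]])

def Spec_get_shop_included_with_mall_data (shop_graph_data_set : List (String × Bool)) (show_item_data_set : List (String × Bool)) (mall_info_data_set : List (List (String × String))) (out : List (List (String × String))) : Prop := out = get_shop_included_with_mall_data_alt shop_graph_data_set show_item_data_set mall_info_data_set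
instance (shop_graph_data_set : List (String × Bool)) (show_item_data_set : List (String × Bool)) (mall_info_data_set : List (List (String × String))) (out : List (List (String × String))) : Decidable (Spec_get_shop_included_with_mall_data shop_graph_data_set show_item_data_set mall_info_data_set out) := by unfold Spec_get_shop_included_with_mall_data; infer_instance

-- ===== CLAIM (what is proved, stated in full; the proofs are below) =====
def Claim_equal_get_shop_included_with_mall_data : Prop := ∀ (shop_graph_data_set : List (String × Bool)) (show_item_data_set : List (String × Bool)) (mall_info_data_set : List (List (String × String))), Dom_get_shop_included_with_mall_data shop_graph_data_set show_item_data_set mall_info_data_set → Pre_get_shop_included_with_mall_data shop_graph_data_set show_item_data_set mall_info_data_set → Spec_get_shop_included_with_mall_data shop_graph_data_set show_item_data_set mall_info_data_set (get_shop_included_with_mall_data shop_graph_data_set show_item_data_set mall_info_data_set)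

-- ===== LEMMAS AND PROOFS =====

-- A's not_included_shops dict contains n iff n is among the folded keys and not a key of show_item.
theorem pv_not_included_contains (si : PySem.Dict String Bool) (ks : List String)
    (d : PySem.Dict String Bool) (n : String) :
    (ks.foldl (fun d k => if si.contains k then d else d.insert k true) d).contains n
      = (d.contains n || (ks.contains n && !si.contains n)) := by
  induction ks generalizing d with
  | nil => simp
  | cons k ks ih =>
    simp only [List.foldl_cons, ih]
    by_cases hk : n = k
    · subst hk
      cases hsi : si.contains n <;> simp [hsi, PySem.Dict.contains_insert]
    · have hbeq' : (n == k) = false := by simp [hk]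
      cases hsi : si.contains k <;>
        simp [PySem.Dict.contains_insert, hbeq', hk]

-- the test A ends up applying to each mall_info equals B's compound test
theorem pv_test_eq (sgd sid : List (String × Bool)) (n : String) :
    ((PySem.Dict.ofList sgd).keys.foldl
        (fun d k => if (PySem.Dict.ofList sid).contains k then d else d.insert k true)
        PySem.Dict.empty).contains n
      = ((PySem.Dict.ofList sgd).contains n && !((PySem.Dict.ofList sid).contains n)) := by
  rw [pv_not_included_contains]
  simp [PySem.Dict.contains_eq_decide_mem_keys]

-- B's recursion computes the filter by the compound test
theorem pv_alt_eq_filter (sgd sid : List (String × Bool)) (mids : List (List (String × String))) :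
    get_shop_included_with_mall_data_alt sgd sid mids
      = mids.filter (fun m =>
          match (PySem.Dict.ofList m).get? "name" with
          | some n => (PySem.Dict.ofList sgd).contains n && !((PySem.Dict.ofList sid).contains n)
          | none => false) := by
  induction mids with
  | nil => rfl
  | cons head rest ih =>
    simp only [get_shop_included_with_mall_data_alt, ih, List.filter_cons]
    cases h : (PySem.Dict.ofList head).get? "name" with
    | none => simp
    | some n => cases hb : (PySem.Dict.ofList sgd).contains n && !((PySem.Dict.ofList sid).contains n) <;> simp [hb]

-- ===== VERDICT (by name: the statement is the Claim_ definition above) =====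
theorem get_shop_included_with_mall_data_spec : Claim_equal_get_shop_included_with_mall_data := by
  intro sgd sid mids _hdom _hpre
  unfold Spec_get_shop_included_with_mall_data
  unfold get_shop_included_with_mall_data
  rw [pv_alt_eq_filter]
  have hbody : ∀ (acc : List (List (String × String))) (m : List (String × String)),
      (match (PySem.Dict.ofList m).get? "name" with
        | some n => if ((PySem.Dict.ofList sgd).keys.foldl
              (fun d k => if (PySem.Dict.ofList sid).contains k then d else d.insert k true)
              PySem.Dict.empty).contains n then acc ++ [m] else acc
        | none => acc)
      = (if (match (PySem.Dict.ofList m).get? "name" with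
          | some n => (PySem.Dict.ofList sgd).contains n && !((PySem.Dict.ofList sid).contains n)
          | none => false) then acc ++ [m] else acc) := by
    intro acc m
    cases h : (PySem.Dict.ofList m).get? "name" with
    | none => simp
    | some n => simp [pv_test_eq sgd sid n]
  simp only [hbody]
  exact PySem.List.foldl_append_if_eq_filter _ mids []
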